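-- pv_equiv track=rewrite | github.com/roeselfa/FeatureLearningBasedDistanceMetrics | Evaluation/AdvancedBA.py | getPredecessorsOfEventInTrace
-- ===== SOURCE A (Python) =====
-- def getPredecessorsOfEventInTrace(event, trace):
--     predecessors = list()
--     if event not in trace:
--         return predecessors
--
--     eventIndex = max(loc for loc, val in enumerate(trace) if val == event)
--     restTrace = trace[:eventIndex]
--
--     for e in restTrace:
--         if e not in predecessors:
--             predecessors.append(e)
--
--     return predecessors
-- ===== SOURCE B (Python) =====
-- def getPredecessorsOfEventInTrace(event, trace):
--     predecessors = []
--     seen_event = False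
--     for e in reversed(trace):
--         if seen_event:
--             predecessors = [e] + [x for x in predecessors if x != e]
--         if e == event:
--             seen_event = True
--     return predecessors
-- ===== Notes on version B (the rewrite author's own statement) =====
-- stated objective: alternative
-- what changed: B makes a single right-to-left sweep building the result back-to-front: once the event has been seen it prepends each element and filters that element's duplicates out of the accumulator, so there is no last-occurrence index computation, no slice and no seen-list membership loop.
import Mathlib
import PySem

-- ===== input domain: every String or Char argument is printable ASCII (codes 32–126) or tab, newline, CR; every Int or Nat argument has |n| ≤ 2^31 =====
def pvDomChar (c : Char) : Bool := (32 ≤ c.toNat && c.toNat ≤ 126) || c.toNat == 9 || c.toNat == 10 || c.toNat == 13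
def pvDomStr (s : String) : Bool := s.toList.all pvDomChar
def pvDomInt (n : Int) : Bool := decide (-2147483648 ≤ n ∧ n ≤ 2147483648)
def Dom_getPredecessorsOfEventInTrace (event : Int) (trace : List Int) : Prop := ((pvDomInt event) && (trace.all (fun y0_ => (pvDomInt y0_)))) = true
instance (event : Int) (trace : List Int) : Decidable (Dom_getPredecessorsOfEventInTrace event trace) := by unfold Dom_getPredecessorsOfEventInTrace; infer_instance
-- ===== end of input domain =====

-- B replaces A's last-index/slice/membership-dedup by a single right-to-left sweep that
-- builds the result back-to-front, filtering out duplicates on each prepend (objective: alternative).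


-- ===== PORT A =====
-- literal port: `event not in trace` guard, max over the enumerate-filter generator (the
-- `none` branch of max? is unreachable: the guard makes the index list nonempty), slice,
-- then the `e not in predecessors` accumulation loop
def getPredecessorsOfEventInTrace (event : Int) (trace : List Int) : List Int :=
  if event ∈ trace then
    match PySem.List.max?
        (((PySem.List.enumerate trace).filter (fun p => p.2 == event)).map (·.1))
        (fun x => x) with
    | none => []
    | some eventIndex =>
      (PySem.List.slice trace none (some eventIndex)).foldl
        (fun acc e => if e ∈ acc then acc else acc ++ [e]) []
  else []

-- ===== PORT B =====
-- literal port of Source B: `for e in reversed(trace)` is a foldr over the list; the state is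
-- (predecessors, seen_event); the comprehension `[x for x in predecessors if x != e]` is the filter
def getPredecessorsOfEventInTrace_alt (event : Int) (trace : List Int) : List Int :=
  (trace.foldr
    (fun e st =>
      ((if st.2 then e :: st.1.filter (fun x => x != e) else st.1),
       (st.2 || (e == event))))
    (([] : List Int), false)).1

-- ===== PRECONDITION & SPEC =====
def Spec_getPredecessorsOfEventInTrace (event : Int) (trace : List Int) (out : List Int) : Prop := out = getPredecessorsOfEventInTrace_alt event trace
instance (event : Int) (trace : List Int) (out : List Int) : Decidable (Spec_getPredecessorsOfEventInTrace event trace out) := by unfold Spec_getPredecessorsOfEventInTrace; infer_instance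

-- ===== CLAIM (what is proved, stated in full; the proofs are below) =====
def Claim_equal_getPredecessorsOfEventInTrace : Prop := ∀ (event : Int) (trace : List Int), Dom_getPredecessorsOfEventInTrace event trace → Spec_getPredecessorsOfEventInTrace event trace (getPredecessorsOfEventInTrace event trace)

-- ===== LEMMAS AND PROOFS =====

lemma pvBeqComm (a b : Int) : (a == b) = decide (b = a) := by
  by_cases h : a = b
  · simp [h]
  · have h' : ¬ b = a := fun e => h e.symm
    simp [h, h']

-- reference spec: ordered first-occurrence list of the prefix strictly before the last `event`
def pvPred (event : Int) : List Int → List Int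
  | [] => []
  | h :: t => if event ∈ t then h :: (pvPred event t).filter (fun x => x != h) else pvPred event t

-- last-occurrence index of `event`, recursively from the front
def pvLast (event : Int) : List Int → Option Nat
  | [] => none
  | h :: t =>
    match pvLast event t with
    | some m => some (m + 1)
    | none => if h == event then some 0 else none

lemma pvLast_eq_none_iff (event : Int) (tr : List Int) :
    pvLast event tr = none ↔ event ∉ tr := by
  induction tr with
  | nil => simp [pvLast]
  | cons h t ih =>
    cases hlo : pvLast event t with
    | some m =>
      have hmem : event ∈ t := by
        by_contra hn
        rw [ih.mpr hn] at hlo; cases hlo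
      rw [pvLast, hlo]
      simp [hmem]
    | none =>
      have hn := ih.mp hlo
      rw [pvLast, hlo]
      by_cases he : h = event
      · simp [he]
      · have he' : event ≠ h := fun a => he a.symm
        simp [he, he', hn]

lemma pvPred_of_not_mem (event : Int) (tr : List Int) (h : event ∉ tr) :
    pvPred event tr = [] := by
  induction tr with
  | nil => rfl
  | cons x t ih =>
    have hm : event ∉ t := fun h' => h (List.mem_cons_of_mem _ h')
    simp [pvPred, hm, ih hm]

lemma pvLast_spec (event : Int) (tr : List Int) (L : Nat) (h : pvLast event tr = some L) :
    ∃ hL : L < tr.length, tr[L] = event ∧ ∀ k, (hk : k < tr.length) → L < k → tr[k] ≠ event := by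
  induction tr generalizing L with
  | nil => simp [pvLast] at h
  | cons x t ih =>
    cases hlo : pvLast event t with
    | some m =>
      rw [pvLast, hlo] at h
      obtain rfl : m + 1 = L := by simpa using h
      obtain ⟨hm, hget, hafter⟩ := ih m hlo
      refine ⟨by simpa using Nat.succ_lt_succ hm, by simpa using hget, ?_⟩
      intro k hk hgt
      match k, hk, hgt with
      | k + 1, hk, hgt =>
        simpa using hafter k (by simpa using hk) (by omega)
    | none =>
      rw [pvLast, hlo] at h
      by_cases hx : x = event
      · obtain rfl : 0 = L := by simpa [hx] using h
        refine ⟨by simp, by simpa using hx, ?_⟩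
        intro k hk hgt
        match k, hk, hgt with
        | k + 1, hk, _ =>
          have := (pvLast_eq_none_iff event t).mp hlo
          simp only [List.getElem_cons_succ]
          exact fun he => this (he ▸ List.getElem_mem _)
      · simp [hx] at h

-- A's enumerate/filter/map index list, and its membership characterisation
def pvIdxs (event : Int) (trace : List Int) : List Int :=
  ((PySem.List.enumerate trace).filter (fun p => p.2 == event)).map (·.1)

lemma mem_pvIdxs (event : Int) (tr : List Int) (y : Int) :
    y ∈ pvIdxs event tr ↔
      ∃ (k : Nat) (hk : k < tr.length), y = (k : Int) ∧ tr[k] = event := by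
  simp only [pvIdxs, List.mem_map, List.mem_filter]
  constructor
  · rintro ⟨p, ⟨hp, he⟩, rfl⟩
    rw [PySem.List.mem_enumerate_iff] at hp
    obtain ⟨k, hk, rfl⟩ := hp
    exact ⟨k, hk, by simp, by simpa using he⟩
  · rintro ⟨k, hk, rfl, he⟩
    exact ⟨((k : Int), tr[k]), ⟨(PySem.List.mem_enumerate_iff _ _ _).mpr ⟨k, hk, by simp⟩, by simp [he]⟩, rfl⟩

-- A's max over the occurrence indices IS pvLast
lemma max?_pvIdxs (event : Int) (tr : List Int) (L : Nat) (h : pvLast event tr = some L) :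
    PySem.List.max? (pvIdxs event tr) (fun x => x) = some (L : Int) := by
  obtain ⟨hL, hget, hafter⟩ := pvLast_spec event tr L h
  have hm_mem : ((L : Nat) : Int) ∈ pvIdxs event tr := (mem_pvIdxs _ _ _).mpr ⟨L, hL, rfl, hget⟩
  have hne : pvIdxs event tr ≠ [] := by
    intro hnil; rw [hnil] at hm_mem; exact absurd hm_mem (List.not_mem_nil)
  obtain ⟨M, hM⟩ : ∃ M, PySem.List.max? (pvIdxs event tr) (fun x => x) = some M := by
    cases hmx : PySem.List.max? (pvIdxs event tr) (fun x => x) with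
    | none => exact absurd ((PySem.List.max?_eq_none_iff _ _).mp hmx) hne
    | some M => exact ⟨M, rfl⟩
  obtain ⟨kM, hkM, rfl, hMev⟩ := (mem_pvIdxs _ _ _).mp (PySem.List.max?_mem hM)
  have hle : ((L : Nat) : Int) ≤ (kM : Int) := PySem.List.max?_isMax hM _ hm_mem
  have hge : kM ≤ L := by
    by_contra hgt
    exact hafter kM hkM (by omega) hMev
  have : kM = L := by omega
  rw [hM, this]

-- A's accumulation loop IS the ordered dedup (Set.ofList fold)
lemma foldA_eq_dedup (l : List Int) :
    l.foldl (fun acc e => if e ∈ acc then acc else acc ++ [e]) [] = PySem.List.dedup l := by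
  rw [PySem.List.dedup_eq_ofList, PySem.Set.ofList_eq_foldl]
  have h : ∀ (t : List Int) (acc : List Int),
      t.foldl (fun acc e => if e ∈ acc then acc else acc ++ [e]) acc
        = t.foldl PySem.Set.add acc := by
    intro t
    induction t with
    | nil => intro acc; rfl
    | cons x t ih =>
      intro acc
      have hx : (if x ∈ acc then acc else acc ++ [x]) = PySem.Set.add acc x := by
        by_cases hv : x ∈ acc <;> simp [PySem.Set.add, hv]
      simp only [List.foldl_cons, hx, ih]
  exact h l []

-- the dedup'd prefix strictly before the last occurrence is pvPred
lemma dedup_take_pvLast (event : Int) (tr : List Int) (L : Nat)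
    (h : pvLast event tr = some L) :
    PySem.List.dedup (tr.take L) = pvPred event tr := by
  induction tr generalizing L with
  | nil => simp [pvLast] at h
  | cons x t ih =>
    cases hlo : pvLast event t with
    | some m =>
      rw [pvLast, hlo] at h
      obtain rfl : m + 1 = L := by simpa using h
      have hmem : event ∈ t := by
        by_contra hn
        rw [(pvLast_eq_none_iff event t).mpr hn] at hlo; cases hlo
      rw [List.take_succ_cons, PySem.List.dedup_eq_ofList, PySem.Set.ofList_cons,
        ← PySem.List.dedup_eq_ofList, ih m hlo]
      simp [pvPred, hmem, PySem.Set.discard, bne]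
    | none =>
      rw [pvLast, hlo] at h
      by_cases hx : x = event
      · obtain rfl : 0 = L := by simpa [hx] using h
        have hn : event ∉ t := (pvLast_eq_none_iff event t).mp hlo
        simp [pvPred, hn, pvPred_of_not_mem event t hn, PySem.List.dedup]
      · simp [hx] at h

-- B's foldr state: second component = `event ∈ processed suffix`, first = pvPred of the suffix
lemma foldB_eq (event : Int) (tr : List Int) :
    tr.foldr
      (fun e st =>
        ((if st.2 then e :: st.1.filter (fun x => x != e) else st.1),
         (st.2 || (e == event))))
      (([] : List Int), false)
    = (pvPred event tr, decide (event ∈ tr)) := by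
  induction tr with
  | nil => simp [pvPred]
  | cons x t ih =>
    rw [List.foldr_cons, ih]
    by_cases hm : event ∈ t <;> by_cases hx : x = event <;>
      simp [pvPred, hm, hx, pvBeqComm]

-- ===== VERDICT (by name: the statement is the Claim_ definition above) =====
theorem getPredecessorsOfEventInTrace_spec : Claim_equal_getPredecessorsOfEventInTrace := by
  intro event trace _
  unfold Spec_getPredecessorsOfEventInTrace getPredecessorsOfEventInTrace getPredecessorsOfEventInTrace_alt
  rw [foldB_eq]
  by_cases hm : event ∈ trace
  · obtain ⟨L, hL⟩ : ∃ L, pvLast event trace = some L := by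
      cases hlo : pvLast event trace with
      | none => exact absurd ((pvLast_eq_none_iff event trace).mp hlo) (by simpa using hm)
      | some L => exact ⟨L, rfl⟩
    rw [if_pos hm,
      show ((PySem.List.enumerate trace).filter (fun p => p.2 == event)).map (·.1)
        = pvIdxs event trace from rfl,
      max?_pvIdxs event trace L hL]
    simp only [PySem.List.slice_to_natCast]
    rw [foldA_eq_dedup, dedup_take_pvLast event trace L hL]
  · rw [if_neg hm]
    simp [pvPred_of_not_mem event trace hm]
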